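-- pv_equiv track=rewrite | github.com/DavnFs/catatUang | api/telegram-webhook.py | _get_first_transaction_date
-- ===== SOURCE A (Python) =====
-- def _get_first_transaction_date(data):
--     """Get the date of first transaction for tenure calculation"""
--     if not data:
--         return None
--
--     dates = []
--     for row in data:
--         date_str = row.get('Tanggal', '')
--         if date_str:
--             try:
--                 dates.append(date_str)
--             except:
--                 continue
--
--     return min(dates) if dates else None
-- ===== SOURCE B (Python) =====
-- def _get_first_transaction_date(data):
--     """Get the date of first transaction for tenure calculation"""
--     earliest = None
--     for row in data:
--         date_str = row.get('Tanggal', '')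
--         if date_str:
--             if earliest is None or date_str < earliest:
--                 earliest = date_str
--     return earliest
-- ===== Notes on version B (the rewrite author's own statement) =====
-- stated objective: simpler
-- what changed: Replaces the build-a-list-of-dates-then-min() two-phase approach with a single pass that maintains a running-minimum accumulator and never materializes the intermediate list.
import Mathlib
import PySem

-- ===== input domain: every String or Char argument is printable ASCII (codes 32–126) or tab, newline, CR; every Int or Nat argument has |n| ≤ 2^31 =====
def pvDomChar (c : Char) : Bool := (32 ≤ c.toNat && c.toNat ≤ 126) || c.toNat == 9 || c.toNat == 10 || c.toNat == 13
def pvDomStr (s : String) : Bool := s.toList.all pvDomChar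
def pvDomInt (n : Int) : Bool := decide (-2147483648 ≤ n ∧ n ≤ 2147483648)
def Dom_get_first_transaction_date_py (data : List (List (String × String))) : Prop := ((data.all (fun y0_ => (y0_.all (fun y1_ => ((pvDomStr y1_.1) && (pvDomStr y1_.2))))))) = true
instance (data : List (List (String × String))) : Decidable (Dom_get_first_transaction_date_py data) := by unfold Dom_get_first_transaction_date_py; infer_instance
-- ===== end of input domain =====

-- ===== PORT A =====
-- A: collect all non-empty 'Tanggal' values into a list, then take min() of it (None if empty).
def pvCollect (acc : List String) (row : List (String × String)) : List String :=
  let date_str := PySem.Dict.getD (PySem.Dict.mk row) "Tanggal" ""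
  if date_str ≠ "" then acc ++ [date_str] else acc

def get_first_transaction_date_py (data : List (List (String × String))) : Option String :=
  if data = [] then none
  else
    let dates := data.foldl pvCollect []
    if dates ≠ [] then PySem.List.min? dates (fun x => x) else none

-- ===== PORT B =====
-- B: single pass keeping a running-minimum accumulator; no intermediate list.
def pvStepB (earliest : Option String) (row : List (String × String)) : Option String :=
  let date_str := PySem.Dict.getD (PySem.Dict.mk row) "Tanggal" ""
  if date_str ≠ "" then
    match earliest with
    | none => some date_str
    | some e => if date_str < e then some date_str else some e
  else earliest

def get_first_transaction_date_py_alt (data : List (List (String × String))) : Option String :=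
  data.foldl pvStepB none

-- ===== PRECONDITION & SPEC =====
def Spec_get_first_transaction_date_py (data : List (List (String × String))) (out : Option String) : Prop := out = get_first_transaction_date_py_alt data
instance (data : List (List (String × String))) (out : Option String) : Decidable (Spec_get_first_transaction_date_py data out) := by unfold Spec_get_first_transaction_date_py; infer_instance

-- ===== CLAIM (what is proved, stated in full; the proofs are below) =====
def Claim_equal_get_first_transaction_date_py : Prop := ∀ (data : List (List (String × String))), Dom_get_first_transaction_date_py data → Spec_get_first_transaction_date_py data (get_first_transaction_date_py data)

-- ===== LEMMAS AND PROOFS =====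

def pvDates (data : List (List (String × String))) : List String :=
  (data.map (fun row => PySem.Dict.getD (PySem.Dict.mk row) "Tanggal" "")).filter (fun d => d ≠ "")

theorem pvDatesA (data : List (List (String × String))) (acc : List String) :
    data.foldl pvCollect acc = acc ++ pvDates data := by
  induction data generalizing acc with
  | nil => simp [pvDates]
  | cons h t ih =>
    simp only [List.foldl_cons]
    rw [ih]
    by_cases hd : PySem.Dict.getD (PySem.Dict.mk h) "Tanggal" "" = ""
    · simp [pvCollect, hd, pvDates]
    · simp [pvCollect, hd, pvDates]

theorem pvMinStep (d e : String) :
    (if d < e then some d else some e) = some (min e d) := by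
  rcases le_or_gt e d with h | h
  · simp [h, not_lt.2 h]
  · have h' := le_of_lt h
    simp [min_def, h, not_le.2 h]

theorem pvFoldSome (data : List (List (String × String))) (e : String) :
    data.foldl pvStepB (some e) = some ((pvDates data).foldl min e) := by
  induction data generalizing e with
  | nil => simp [pvDates]
  | cons h t ih =>
    simp only [List.foldl_cons]
    by_cases hd : PySem.Dict.getD (PySem.Dict.mk h) "Tanggal" "" = ""
    · rw [show pvStepB (some e) h = some e by simp [pvStepB, hd], ih]
      simp [pvDates, hd]
    · rw [show pvStepB (some e) h =
          some (min e (PySem.Dict.getD (PySem.Dict.mk h) "Tanggal" "")) by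
            simp only [pvStepB]
            rw [if_pos hd]
            exact pvMinStep _ _, ih]
      simp [pvDates, hd]

theorem pvFoldNone (data : List (List (String × String))) :
    get_first_transaction_date_py_alt data = PySem.List.min? (pvDates data) (fun x => x) := by
  unfold get_first_transaction_date_py_alt
  induction data with
  | nil => simp [pvDates, PySem.List.min?]
  | cons h t ih =>
    simp only [List.foldl_cons]
    by_cases hd : PySem.Dict.getD (PySem.Dict.mk h) "Tanggal" "" = ""
    · rw [show pvStepB none h = none by simp [pvStepB, hd], ih]
      simp [pvDates, hd]
    · rw [show pvStepB none h = some (PySem.Dict.getD (PySem.Dict.mk h) "Tanggal" "") by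
          simp [pvStepB, hd], pvFoldSome]
      rw [show pvDates (h :: t) = PySem.Dict.getD (PySem.Dict.mk h) "Tanggal" "" :: pvDates t by
          simp [pvDates, hd]]
      rw [PySem.List.min?_id_cons]

-- ===== VERDICT (by name: the statement is the Claim_ definition above) =====
theorem get_first_transaction_date_py_spec : Claim_equal_get_first_transaction_date_py := by
  intro data _
  unfold Spec_get_first_transaction_date_py get_first_transaction_date_py
  rw [pvFoldNone, pvDatesA]
  simp only [List.nil_append]
  by_cases hdata : data = []
  · subst hdata; simp [pvDates, PySem.List.min?]
  · by_cases hds : pvDates data = []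
    · simp [hdata, hds, PySem.List.min?]
    · simp [hdata, hds]
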